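-- pv_equiv track=rewrite | github.com/danihazan/share-with-ori | model_generation.py | check_column_deadlocks
-- ===== SOURCE A (Python) =====
-- def check_column_deadlocks(board):
--     rows = len(board)
--     cols = len(board[0])
--     deadlock_matrix = [[False for _ in range(cols)] for _ in range(rows)]
--
--     for j in range(cols):
--         start = -1  # Start of a potential deadlock segment
--         for i in range(rows):
--             if board[i][j] == '#':
--                 if start != -1:  # There was a segment before this wall
--                     if '.' not in [board[k][j] for k in range(start, i)]:  # Check for no goals in the segment
--                         # Check if all cells to the immediate left are walls
--                         all_left_blocked = j > 0 and all(board[k][j-1] == '#' for k in range(start, i))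
--                         # Check if all cells to the immediate right are walls
--                         all_right_blocked = j < cols-1 and all(board[k][j+1] == '#' for k in range(start, i))
--
--                         if all_left_blocked or all_right_blocked:
--                             for k in range(start, i):
--                                 deadlock_matrix[k][j] = True
--                 start = i + 1  # Update start to the position after the wall
--             elif board[i][j] == '.':
--                 start = -1  # Reset start because a goal disrupts the potential deadlock segment
--
--     return deadlock_matrix
-- ===== SOURCE B (Python) =====
-- def check_column_deadlocks(board):
--     rows = len(board)
--     cols = len(board[0])
--     marked = [set() for _ in range(cols)]
--     for j in range(cols):
--         walls = [i for i in range(rows) if board[i][j] == '#']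
--         for w1, w2 in zip(walls, walls[1:]):
--             seg = range(w1 + 1, w2)
--             if any(board[k][j] == '.' for k in seg):
--                 continue
--             left_blocked = j > 0 and all(board[k][j - 1] == '#' for k in seg)
--             right_blocked = j < cols - 1 and all(board[k][j + 1] == '#' for k in seg)
--             if left_blocked or right_blocked:
--                 marked[j].update(seg)
--     return [[i in marked[j] for j in range(cols)] for i in range(rows)]
-- ===== Notes on version B (the rewrite author's own statement) =====
-- stated objective: alternative
-- what changed: Instead of a stateful row scan with a -1 sentinel that mutates a prebuilt matrix, B extracts each column's wall indices, forms the segments between consecutive walls, tests each segment (no goal, left- or right-blocked), collects marked rows in per-column sets and builds the result matrix in one final comprehension.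
import Mathlib
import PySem

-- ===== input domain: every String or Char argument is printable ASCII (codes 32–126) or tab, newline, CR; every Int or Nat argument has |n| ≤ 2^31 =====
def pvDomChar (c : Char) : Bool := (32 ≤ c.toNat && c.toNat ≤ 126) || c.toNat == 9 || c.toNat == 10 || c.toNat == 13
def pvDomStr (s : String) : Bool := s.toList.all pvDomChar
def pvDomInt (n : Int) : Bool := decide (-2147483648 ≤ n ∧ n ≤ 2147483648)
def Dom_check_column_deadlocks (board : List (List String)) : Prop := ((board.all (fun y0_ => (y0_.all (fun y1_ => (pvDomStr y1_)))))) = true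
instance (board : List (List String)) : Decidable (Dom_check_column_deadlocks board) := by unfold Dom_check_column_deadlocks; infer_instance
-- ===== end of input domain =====

-- B replaces A's stateful row scan (start sentinel, in-place matrix mutation) by a per-column
-- wall-index list: it forms the segments between consecutive walls, tests each segment once,
-- collects marked rows in per-column sets, and builds the result matrix in one final map.

-- ===== PORT A =====
-- board[i][j]: Python raises IndexError out of range; Pre_ guarantees in range, where getD is exact.
def pvCell (board : List (List String)) (i j : Nat) : String := (board.getD i []).getD j ""

-- deadlock_matrix[k][j] = True (k < rows and j < cols always hold under Pre_, where modify/set are exact)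
def pvSetTrue (M : List (List Bool)) (k j : Nat) : List (List Bool) := M.modify k (fun row => row.set j true)

-- body of A's inner `for i in range(rows)` loop; state = (start, deadlock_matrix)
def pvAStep (board : List (List String)) (cols j : Nat) (st : Int × List (List Bool)) (i : Nat) : Int × List (List Bool) :=
  let start := st.1
  let M := st.2
  if pvCell board i j == "#" then
    let M' :=
      if start != -1 then
        let seg := PySem.List.pyRange start (i : Int) 1
        if !((seg.map (fun k => pvCell board k.toNat j)).contains ".") then
          let allLeft := decide (0 < j) && seg.all (fun k => pvCell board k.toNat (j - 1) == "#")
          let allRight := decide (j < cols - 1) && seg.all (fun k => pvCell board k.toNat (j + 1) == "#")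
          if allLeft || allRight then seg.foldl (fun M2 k => pvSetTrue M2 k.toNat j) M else M
        else M
      else M
    ((i : Int) + 1, M')
  else if pvCell board i j == "." then (-1, M)
  else (start, M)

def check_column_deadlocks (board : List (List String)) : List (List Bool) :=
  let rows := board.length
  let cols := (board.headD []).length
  let init : List (List Bool) := (List.range rows).map (fun _ => (List.range cols).map (fun _ => false))
  (List.range cols).foldl (fun M j => ((List.range rows).foldl (pvAStep board cols j) ((-1 : Int), M)).2) init

-- ===== PORT B =====
-- body of B's `for w1, w2 in zip(walls, walls[1:])` loop over one column's wall pairs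
def pvBPairStep (board : List (List String)) (cols j : Nat) (S : PySem.Set Nat) (p : Nat × Nat) : PySem.Set Nat :=
  let seg := List.range' (p.1 + 1) (p.2 - (p.1 + 1))
  if seg.any (fun k => pvCell board k j == ".") then S
  else
    let leftBlocked := decide (0 < j) && seg.all (fun k => pvCell board k (j - 1) == "#")
    let rightBlocked := decide (j < cols - 1) && seg.all (fun k => pvCell board k (j + 1) == "#")
    if leftBlocked || rightBlocked then seg.foldl (fun S2 k => S2.add k) S else S

-- marked[j]: the set of rows marked in column j
def pvBColMarks (board : List (List String)) (rows cols j : Nat) : PySem.Set Nat :=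
  let walls := (List.range rows).filter (fun i => pvCell board i j == "#")
  ((walls.zip walls.tail).foldl (pvBPairStep board cols j) (PySem.Set.ofList []))

def check_column_deadlocks_alt (board : List (List String)) : List (List Bool) :=
  let rows := board.length
  let cols := (board.headD []).length
  let marked : List (PySem.Set Nat) := (List.range cols).map (pvBColMarks board rows cols)
  (List.range rows).map (fun i => (List.range cols).map (fun j => (marked.getD j []).contains i))

-- ===== PRECONDITION & SPEC =====
-- Pre_ excludes exactly the inputs on which Python A raises IndexError: the empty board (board[0])
-- and ragged boards having a row shorter than the first row (board[i][j] / board[k][j-1] / board[k][j+1]).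
def Pre_check_column_deadlocks (board : List (List String)) : Prop :=
  board ≠ [] ∧ ∀ row ∈ board, (board.headD []).length ≤ row.length
instance (board : List (List String)) : Decidable (Pre_check_column_deadlocks board) := by
  unfold Pre_check_column_deadlocks; infer_instance

def pvWitness_check_column_deadlocks : List (List String) := [["#", " "], ["x", "#"], ["#", "."]]

def Spec_check_column_deadlocks (board : List (List String)) (out : List (List Bool)) : Prop := out = check_column_deadlocks_alt board
instance (board : List (List String)) (out : List (List Bool)) : Decidable (Spec_check_column_deadlocks board out) := by unfold Spec_check_column_deadlocks; infer_instance

-- ===== CLAIM (what is proved, stated in full; the proofs are below) =====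
def Claim_equal_check_column_deadlocks : Prop := ∀ (board : List (List String)), Dom_check_column_deadlocks board → Pre_check_column_deadlocks board → Spec_check_column_deadlocks board (check_column_deadlocks board)

-- ===== LEMMAS AND PROOFS =====
def pvSegOK (board : List (List String)) (cols j a b : Nat) : Bool :=
  (!((List.range' a (b - a)).any (fun k => pvCell board k j == "."))) &&
  ((decide (0 < j) && (List.range' a (b - a)).all (fun k => pvCell board k (j - 1) == "#")) ||
   (decide (j < cols - 1) && (List.range' a (b - a)).all (fun k => pvCell board k (j + 1) == "#")))

lemma pvPyRange_natCast (a b : Nat) :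
    PySem.List.pyRange (a : Int) (b : Int) 1 = (List.range' a (b - a)).map (fun (k : Nat) => (k : Int)) := by
  rw [PySem.List.pyRange_one, List.range'_eq_map_range]
  have h : ((b : Int) - (a : Int)).toNat = b - a := by omega
  rw [h, List.map_map]
  simp only [List.map_inj_left, Function.comp]
  intro k _; push_cast; ring

lemma pvAStep_wall (board : List (List String)) (cols j p a : Nat) (M : List (List Bool))
    (hw : (pvCell board p j == "#") = true) :
    pvAStep board cols j (((a : Nat) : Int), M) p =
      ((p : Int) + 1,
       if pvSegOK board cols j a p
       then (List.range' a (p - a)).foldl (fun M2 k => pvSetTrue M2 k j) M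
       else M) := by
  have hne : (((a : Nat) : Int) != -1) = true := by simp
  simp only [pvAStep, hw, if_true, hne, pvPyRange_natCast, List.map_map, Function.comp_def,
    Int.toNat_natCast, List.foldl_map]
  have hcon : (((List.range' a (p-a)).map (fun k => pvCell board k j)).contains ".")
      = ((List.range' a (p-a)).any (fun k => pvCell board k j == ".")) := by
    simp [List.any_eq]
  rw [hcon, pvSegOK]
  cases h1 : ((List.range' a (p-a)).any (fun k => pvCell board k j == ".")) <;>
    cases h2 : ((decide (0 < j) && (List.range' a (p-a)).all (fun k => pvCell board k (j - 1) == "#")) ||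
       (decide (j < cols - 1) && (List.range' a (p-a)).all (fun k => pvCell board k (j + 1) == "#")))
  · try simp only [h1, h2]
    try simp
    intro h
    simp only [Bool.or_eq_false_iff, Bool.and_eq_false_iff] at h2
    simp at h2
    rcases h with ⟨hj0, hA⟩ | ⟨hjc, hA⟩
    · rcases h2.1 with h0 | ⟨x, ⟨hx1, hx2⟩, hx3⟩
      · omega
      · exact absurd (hA x hx1 hx2) hx3
    · rcases h2.2 with h0 | ⟨x, ⟨hx1, hx2⟩, hx3⟩
      · omega
      · exact absurd (hA x hx1 hx2) hx3
  · try simp only [h1, h2]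
    try simp
    intro hL hR
    exfalso
    simp at h2
    rcases h2 with ⟨hj0, hall⟩ | ⟨hjc, hall⟩
    · obtain ⟨x, hx1, hx2, hx3⟩ := hL hj0
      exact hx3 (hall x hx1 hx2)
    · obtain ⟨x, hx1, hx2, hx3⟩ := hR hjc
      exact hx3 (hall x hx1 hx2)
  · simp [h1]
  · simp [h1]

lemma pvAStep_wall' (board : List (List String)) (cols j p : Nat) (s : Int) (M : List (List Bool))
    (hs0 : 0 ≤ s) (hw : (pvCell board p j == "#") = true) :
    pvAStep board cols j (s, M) p =
      ((p : Int) + 1,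
       if pvSegOK board cols j s.toNat p
       then (List.range' s.toNat (p - s.toNat)).foldl (fun M2 k => pvSetTrue M2 k j) M
       else M) := by
  have h := pvAStep_wall board cols j p s.toNat M hw
  rwa [Int.toNat_of_nonneg hs0] at h

lemma pvAStep_wall_neg (board : List (List String)) (cols j p : Nat) (M : List (List Bool))
    (hw : (pvCell board p j == "#") = true) :
    pvAStep board cols j ((-1 : Int), M) p = ((p : Int) + 1, M) := by
  simp [pvAStep, hw]

lemma pvAStep_dot (board : List (List String)) (cols j p : Nat) (s : Int) (M : List (List Bool))
    (hw : (pvCell board p j == "#") = false) (hd : (pvCell board p j == ".") = true) :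
    pvAStep board cols j (s, M) p = ((-1 : Int), M) := by
  simp [pvAStep, hw, hd]

lemma pvAStep_other (board : List (List String)) (cols j p : Nat) (s : Int) (M : List (List Bool))
    (hw : (pvCell board p j == "#") = false) (hd : (pvCell board p j == ".") = false) :
    pvAStep board cols j (s, M) p = (s, M) := by
  simp [pvAStep, hw, hd]

def pvGetB (M : List (List Bool)) (t u : Nat) : Bool := (M.getD t []).getD u false

def pvShape (M : List (List Bool)) (r c : Nat) : Prop :=
  M.length = r ∧ ∀ t (h : t < M.length), M[t].length = c

lemma pvGetB_setTrue (M : List (List Bool)) (r c k j t u : Nat)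
    (hM : pvShape M r c) (ht : t < r) (hu : u < c) (hj : j < c) (hk : k < r) :
    pvGetB (pvSetTrue M k j) t u = (pvGetB M t u || (decide (u = j) && decide (t = k))) := by
  obtain ⟨h1, h2⟩ := hM
  have htM : t < M.length := h1 ▸ ht
  have hrow : M[t].length = c := h2 t htM
  have hu' : u < M[t].length := hrow ▸ hu
  have hget : pvGetB M t u = M[t].getD u false := by
    simp [pvGetB, List.getD_eq_getElem?_getD, List.getElem?_eq_getElem htM]
  have htM' : t < (pvSetTrue M k j).length := by simpa [pvSetTrue] using htM
  have hstep : pvGetB (pvSetTrue M k j) t u = (pvSetTrue M k j)[t].getD u false := by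
    simp [pvGetB, List.getD_eq_getElem?_getD, List.getElem?_eq_getElem htM']
  rw [hstep, hget]
  unfold pvSetTrue
  rw [List.getElem_modify]
  by_cases hkt : k = t
  · subst hkt
    by_cases hju : j = u
    · subst hju
      simp [List.getD_eq_getElem?_getD, List.getElem?_set, hu']
    · simp [List.getD_eq_getElem?_getD, List.getElem?_set, hju, Ne.symm hju]
  · have : decide (t = k) = false := by simp; exact fun h => hkt h.symm
    simp [hkt, this]

lemma pvShape_setTrue (M : List (List Bool)) (r c k j : Nat) (hM : pvShape M r c) :
    pvShape (pvSetTrue M k j) r c := by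
  obtain ⟨h1, h2⟩ := hM
  refine ⟨by simp [pvSetTrue, h1], ?_⟩
  intro t ht
  unfold pvSetTrue
  rw [List.getElem_modify]
  split
  · simp only [List.length_set]; exact h2 t (by simpa [pvSetTrue] using ht)
  · exact h2 t (by simpa [pvSetTrue] using ht)

lemma pvShape_foldl_setTrue (ks : List Nat) (M : List (List Bool)) (r c j : Nat) (hM : pvShape M r c) :
    pvShape (ks.foldl (fun M2 k => pvSetTrue M2 k j) M) r c := by
  induction ks generalizing M with
  | nil => exact hM
  | cons k ks ih => exact ih _ (pvShape_setTrue M r c k j hM)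

lemma pvGetB_foldl_setTrue (ks : List Nat) (M : List (List Bool)) (r c j t u : Nat)
    (hM : pvShape M r c) (ht : t < r) (hu : u < c) (hj : j < c) (hks : ∀ k ∈ ks, k < r) :
    pvGetB (ks.foldl (fun M2 k => pvSetTrue M2 k j) M) t u
      = (pvGetB M t u || (decide (u = j) && ks.contains t)) := by
  induction ks generalizing M with
  | nil => simp
  | cons k ks ih =>
    rw [List.foldl_cons, ih _ (pvShape_setTrue M r c k j hM) (fun x hx => hks x (by simp [hx])),
        pvGetB_setTrue M r c k j t u hM ht hu hj (hks k (by simp))]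
    simp only [List.contains_cons, Bool.or_assoc, Bool.and_or_distrib_left, Bool.beq_eq_decide_eq]

def pvScanMark (board : List (List String)) (cols j : Nat) : List Nat → Option Nat → Nat → Bool
  | [], _, _ => false
  | i :: L, s, t =>
    if pvCell board i j == "#" then
      ((match s with
        | some a => pvSegOK board cols j a i && decide (a ≤ t ∧ t < i)
        | none => false) : Bool) || pvScanMark board cols j L (some (i + 1)) t
    else if pvCell board i j == "." then pvScanMark board cols j L none t
    else pvScanMark board cols j L s t

lemma pvContains_range' (a b t : Nat) (hab : a ≤ b) :
    ((List.range' a (b - a)).contains t) = decide (a ≤ t ∧ t < b) := by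
  have h : (t ∈ List.range' a (b - a)) ↔ (a ≤ t ∧ t < b) := by
    rw [List.mem_range'_1]; omega
  simp [h]

lemma pvInnerA (board : List (List String)) (rows cols j : Nat) :
    ∀ (n p : Nat) (s : Int) (M : List (List Bool)), pvShape M rows cols → j < cols →
    (s = -1 ∨ (0 ≤ s ∧ s.toNat ≤ p)) → p + n ≤ rows →
    pvShape ((List.range' p n).foldl (pvAStep board cols j) (s, M)).2 rows cols ∧
    ∀ t u, t < rows → u < cols →
      pvGetB ((List.range' p n).foldl (pvAStep board cols j) (s, M)).2 t u
        = (pvGetB M t u ||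
           (decide (u = j) && pvScanMark board cols j (List.range' p n) (if s = -1 then none else some s.toNat) t)) := by
  intro n
  induction n with
  | zero =>
    intro p s M hM hj hs hpn
    exact ⟨hM, by intro t u ht hu; simp [pvScanMark]⟩
  | succ n ih =>
    intro p s M hM hj hs hpn
    rw [List.range'_succ, List.foldl_cons]
    by_cases hw : (pvCell board p j == "#") = true
    · by_cases hsm : s = -1
      · subst hsm
        rw [pvAStep_wall_neg board cols j p M hw]
        have hIH := ih (p+1) ((p : Int)+1) M hM hj (Or.inr ⟨by omega, by omega⟩) (by omega)
        refine ⟨hIH.1, ?_⟩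
        intro t u ht hu
        rw [hIH.2 t u ht hu]
        have h1 : ¬((p : Int) + 1 = -1) := by omega
        have h2 : ((p : Int) + 1).toNat = p + 1 := by omega
        simp only [if_neg h1, h2]
        simp [pvScanMark, hw]
      · have hs0 : 0 ≤ s := (hs.resolve_left hsm).1
        have hsp : s.toNat ≤ p := (hs.resolve_left hsm).2
        rw [pvAStep_wall' board cols j p s M hs0 hw]
        have hM1 : pvShape (if pvSegOK board cols j s.toNat p
            then (List.range' s.toNat (p - s.toNat)).foldl (fun M2 k => pvSetTrue M2 k j) M
            else M) rows cols := by
          split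
          · exact pvShape_foldl_setTrue _ M rows cols j hM
          · exact hM
        have hIH := ih (p+1) ((p : Int)+1) _ hM1 hj (Or.inr ⟨by omega, by omega⟩) (by omega)
        refine ⟨hIH.1, ?_⟩
        intro t u ht hu
        rw [hIH.2 t u ht hu]
        have h1 : ¬((p : Int) + 1 = -1) := by omega
        have h2 : ((p : Int) + 1).toNat = p + 1 := by omega
        simp only [if_neg h1, h2]
        rw [show (if s = -1 then (none : Option Nat) else some s.toNat) = some s.toNat from by rw [if_neg hsm]]
        simp only [pvScanMark, hw, if_true]
        cases hOK : pvSegOK board cols j s.toNat p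
        · simp
        · rw [if_pos rfl]
          rw [pvGetB_foldl_setTrue _ M rows cols j t u hM ht hu hj
            (fun k hk => by rw [List.mem_range'_1] at hk; omega)]
          rw [pvContains_range' s.toNat p t hsp]
          simp [Bool.or_assoc, Bool.and_or_distrib_left]
    · have hw' : (pvCell board p j == "#") = false := by
        simp only [Bool.not_eq_true] at hw; exact hw
      by_cases hd : (pvCell board p j == ".") = true
      · rw [pvAStep_dot board cols j p s M hw' hd]
        have hIH := ih (p+1) (-1) M hM hj (Or.inl rfl) (by omega)
        refine ⟨hIH.1, ?_⟩
        intro t u ht hu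
        rw [hIH.2 t u ht hu]
        have hnone : (if (-1 : Int) = -1 then (none : Option Nat) else some ((-1 : Int)).toNat) = none := if_pos rfl
        rw [hnone]
        simp only [pvScanMark]
        rw [if_neg (show ¬((pvCell board p j == "#") = true) from by simp [hw']), if_pos hd]
      · have hd' : (pvCell board p j == ".") = false := by
          simp only [Bool.not_eq_true] at hd; exact hd
        rw [pvAStep_other board cols j p s M hw' hd']
        have hIH := ih (p+1) s M hM hj (hs.imp id (fun h => ⟨h.1, by omega⟩)) (by omega)
        refine ⟨hIH.1, ?_⟩
        intro t u ht hu
        rw [hIH.2 t u ht hu]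
        simp only [pvScanMark]
        rw [if_neg (show ¬((pvCell board p j == "#") = true) from by simp [hw']),
            if_neg (show ¬((pvCell board p j == ".") = true) from by simp [hd'])]

lemma pvOuterA (board : List (List String)) (rows cols : Nat) :
    ∀ (js : List Nat) (M : List (List Bool)), pvShape M rows cols → (∀ j ∈ js, j < cols) →
    pvShape (js.foldl (fun M j => ((List.range rows).foldl (pvAStep board cols j) ((-1 : Int), M)).2) M) rows cols ∧
    ∀ t u, t < rows → u < cols →
      pvGetB (js.foldl (fun M j => ((List.range rows).foldl (pvAStep board cols j) ((-1 : Int), M)).2) M) t u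
        = (pvGetB M t u || (js.contains u && pvScanMark board cols u (List.range rows) none t)) := by
  intro js
  induction js with
  | nil =>
    intro M hM hjs
    exact ⟨hM, by intro t u ht hu; simp⟩
  | cons j js ih =>
    intro M hM hjs
    rw [List.foldl_cons]
    have hj : j < cols := hjs j (by simp)
    have hInner := pvInnerA board rows cols j rows 0 (-1) M hM hj (Or.inl rfl) (by omega)
    rw [List.range_eq_range'] at *
    have hIH := ih _ hInner.1 (fun x hx => hjs x (by simp [hx]))
    refine ⟨hIH.1, ?_⟩
    intro t u ht hu
    rw [hIH.2 t u ht hu, hInner.2 t u ht hu]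
    have hnone : (if (-1 : Int) = -1 then (none : Option Nat) else some ((-1 : Int)).toNat) = none := if_pos rfl
    rw [hnone]
    simp only [List.contains_cons]
    by_cases huj : u = j
    · subst huj
      cases h1 : pvGetB M t u <;>
        cases h2 : pvScanMark board cols u (List.range' 0 rows 1) none t <;>
        cases h3 : js.contains u <;> simp [h1, h2, h3]
    · have : (u == j) = false := by simp [huj]
      simp [huj, this]

def pvPairMark (board : List (List String)) (cols j : Nat) (W : List Nat) (t : Nat) : Bool :=
  (W.zip W.tail).any (fun p => pvSegOK board cols j (p.1 + 1) p.2 && decide (p.1 < t ∧ t < p.2))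

lemma pvPairMark_cons (board : List (List String)) (cols j w : Nat) (W : List Nat) (t : Nat) :
    pvPairMark board cols j (w :: W) t
      = ((match W with
          | [] => false
          | w' :: _ => pvSegOK board cols j (w + 1) w' && decide (w < t ∧ t < w')) ||
         pvPairMark board cols j W t) := by
  cases W with
  | nil => simp [pvPairMark]
  | cons w' W' => simp [pvPairMark]

lemma pvKey (board : List (List String)) (cols j : Nat) :
    ∀ (n p t : Nat),
    (pvScanMark board cols j (List.range' p n) none t
       = pvPairMark board cols j ((List.range' p n).filter (fun i => pvCell board i j == "#")) t)
    ∧ (∀ a, a ≤ p → pvScanMark board cols j (List.range' p n) (some a) t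
       = ((match (List.range' p n).filter (fun i => pvCell board i j == "#") with
           | [] => false
           | w :: _ => pvSegOK board cols j a w && decide (a ≤ t ∧ t < w)) ||
          pvPairMark board cols j ((List.range' p n).filter (fun i => pvCell board i j == "#")) t)) := by
  intro n
  induction n with
  | zero =>
    intro p t
    simp [pvScanMark, pvPairMark]
  | succ n ih =>
    intro p t
    rw [List.range'_succ]
    by_cases hw : (pvCell board p j == "#") = true
    · rw [List.filter_cons]
      simp only [hw, if_true]
      have hsome := (ih (p+1) t).2 (p+1) (le_refl _)
      have hcons := pvPairMark_cons board cols j p ((List.range' (p+1) n).filter (fun i => pvCell board i j == "#")) t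
      constructor
      · show pvScanMark board cols j (p :: List.range' (p+1) n) none t = _
        simp only [pvScanMark, hw, if_pos, Bool.false_or]
        rw [hsome, hcons]
        rcases hF : (List.range' (p+1) n).filter (fun i => pvCell board i j == "#") with _ | ⟨w', rest⟩
        · simp
        · simp [Nat.succ_le_iff]
      · intro a ha
        show pvScanMark board cols j (p :: List.range' (p+1) n) (some a) t = _
        simp only [pvScanMark, hw, if_pos]
        rw [hsome, hcons]
        rcases hF : (List.range' (p+1) n).filter (fun i => pvCell board i j == "#") with _ | ⟨w', rest⟩
        · simp
        · simp [Nat.succ_le_iff, Bool.or_assoc]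
    · have hw' : (pvCell board p j == "#") = false := by
        simp only [Bool.not_eq_true] at hw; exact hw
      rw [List.filter_cons]
      simp only [hw', if_false]
      by_cases hd : (pvCell board p j == ".") = true
      · constructor
        · show pvScanMark board cols j (p :: List.range' (p+1) n) none t = _
          simp only [pvScanMark]
          rw [if_neg (show ¬((pvCell board p j == "#") = true) from by simp [hw']), if_pos hd]
          exact (ih (p+1) t).1
        · intro a ha
          show pvScanMark board cols j (p :: List.range' (p+1) n) (some a) t = _
          simp only [pvScanMark]
          rw [if_neg (show ¬((pvCell board p j == "#") = true) from by simp [hw']), if_pos hd]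
          rw [(ih (p+1) t).1]
          rcases hF : (List.range' (p+1) n).filter (fun i => pvCell board i j == "#") with _ | ⟨w', rest⟩
          · simp
          · have hwmem : w' ∈ (List.range' (p+1) n).filter (fun i => pvCell board i j == "#") := by
              rw [hF]; exact List.mem_cons_self
            have hwr : w' ∈ List.range' (p+1) n := List.mem_of_mem_filter hwmem
            have hpw : p < w' := by
              rw [List.mem_range'_1] at hwr; omega
            have hdot : pvCell board p j = "." := by simpa using hd
            have hany : ((List.range' a (w' - a)).any (fun k => pvCell board k j == ".")) = true := by
              rw [List.any_eq_true]
              exact ⟨p, by rw [List.mem_range'_1]; omega, by simp [hdot]⟩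
            have hseg : pvSegOK board cols j a w' = false := by
              simp only [pvSegOK, hany]
              simp
            simp [hseg]
      · have hd' : (pvCell board p j == ".") = false := by
          simp only [Bool.not_eq_true] at hd; exact hd
        constructor
        · show pvScanMark board cols j (p :: List.range' (p+1) n) none t = _
          simp only [pvScanMark]
          rw [if_neg (show ¬((pvCell board p j == "#") = true) from by simp [hw']),
              if_neg (show ¬((pvCell board p j == ".") = true) from by simp [hd'])]
          exact (ih (p+1) t).1
        · intro a ha
          show pvScanMark board cols j (p :: List.range' (p+1) n) (some a) t = _
          simp only [pvScanMark]
          rw [if_neg (show ¬((pvCell board p j == "#") = true) from by simp [hw']),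
              if_neg (show ¬((pvCell board p j == ".") = true) from by simp [hd'])]
          exact (ih (p+1) t).2 a (by omega)

lemma pvMem_foldl_add (ks : List Nat) (S : PySem.Set Nat) (t : Nat) :
    t ∈ ks.foldl (fun S2 k => S2.add k) S ↔ t ∈ S ∨ t ∈ ks := by
  induction ks generalizing S with
  | nil => simp
  | cons k ks ihk =>
    rw [List.foldl_cons, ihk]
    simp [PySem.Set.mem_add]
    tauto

lemma pvBPairStep_contains (board : List (List String)) (cols j : Nat) (S : PySem.Set Nat)
    (q : Nat × Nat) (t : Nat) :
    ((pvBPairStep board cols j S q).contains t)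
      = (S.contains t || (pvSegOK board cols j (q.1 + 1) q.2 && decide (q.1 < t ∧ t < q.2))) := by
  have hc : ((List.range' (q.1+1) (q.2 - (q.1+1))).contains t) = decide (q.1 < t ∧ t < q.2) := by
    rw [Bool.eq_iff_iff]
    simp [List.mem_range'_1]
    omega
  simp only [pvBPairStep, pvSegOK]
  cases h1 : ((List.range' (q.1+1) (q.2 - (q.1+1))).any (fun k => pvCell board k j == "."))
  · cases h2 : ((decide (0 < j) && (List.range' (q.1+1) (q.2 - (q.1+1))).all (fun k => pvCell board k (j - 1) == "#")) ||
       (decide (j < cols - 1) && (List.range' (q.1+1) (q.2 - (q.1+1))).all (fun k => pvCell board k (j + 1) == "#")))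
    · simp
    · rw [Bool.eq_iff_iff]
      simp [pvMem_foldl_add, List.mem_range'_1]
      have hb : (q.1 + 1 ≤ t ∧ t < q.1 + 1 + (q.2 - (q.1 + 1))) ↔ (q.1 < t ∧ t < q.2) := by omega
      tauto
  · simp

lemma pvBFold_contains (board : List (List String)) (cols j : Nat) :
    ∀ (ps : List (Nat × Nat)) (S : PySem.Set Nat) (t : Nat),
    ((ps.foldl (pvBPairStep board cols j) S).contains t)
      = (S.contains t || ps.any (fun q => pvSegOK board cols j (q.1 + 1) q.2 && decide (q.1 < t ∧ t < q.2))) := by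
  intro ps
  induction ps with
  | nil => intro S t; simp
  | cons q ps ihp =>
    intro S t
    rw [List.foldl_cons, ihp, pvBPairStep_contains]
    simp [Bool.or_assoc]

lemma pvBColMarks_contains (board : List (List String)) (rows cols j t : Nat) :
    ((pvBColMarks board rows cols j).contains t)
      = pvPairMark board cols j ((List.range rows).filter (fun i => pvCell board i j == "#")) t := by
  simp only [pvBColMarks]
  rw [pvBFold_contains]
  simp [pvPairMark]

lemma pvGetB_eq_getElem (M : List (List Bool)) (t u : Nat) (ht : t < M.length) (hu : u < M[t].length) :
    M[t][u] = pvGetB M t u := by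
  simp [pvGetB, List.getD_eq_getElem?_getD, List.getElem?_eq_getElem ht, List.getElem?_eq_getElem hu]

theorem pvPorts_eq (board : List (List String)) :
    check_column_deadlocks board = check_column_deadlocks_alt board := by
  have hInit : pvShape ((List.range board.length).map (fun _ => (List.range (board.headD []).length).map (fun _ => false))) board.length (board.headD []).length := by
    constructor
    · simp
    · intro t ht; simp
  have hA := pvOuterA board board.length (board.headD []).length (List.range (board.headD []).length) _ hInit
    (by intro x hx; simpa using hx)
  simp only [check_column_deadlocks, check_column_deadlocks_alt]
  apply List.ext_getElem
  · rw [hA.1.1]; simp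
  · intro t h1 h2
    have ht : t < board.length := by rw [← hA.1.1]; exact h1
    apply List.ext_getElem
    · rw [hA.1.2 t h1]
      simp
    · intro u hu1 hu2
      have hu : u < (board.headD []).length := by rw [← hA.1.2 t h1]; exact hu1
      rw [pvGetB_eq_getElem _ t u h1 hu1, hA.2 t u ht hu]
      have hinitB : pvGetB ((List.range board.length).map (fun _ => (List.range (board.headD []).length).map (fun _ => false))) t u = false := by
        simp [pvGetB, List.getD_eq_getElem?_getD, List.getElem?_replicate]
        split_ifs <;> simp
      rw [hinitB]
      have hcont : ((List.range (board.headD []).length).contains u) = true := by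
        simpa [List.mem_range] using hu
      rw [hcont]
      simp only [Bool.false_or, Bool.true_and]
      -- RHS cell
      simp only [List.getElem_map, List.getElem_range]
      have hmarked : (((List.range (board.headD []).length).map (pvBColMarks board board.length (board.headD []).length)).getD u []) = pvBColMarks board board.length (board.headD []).length u := by
        rw [List.getD_eq_getElem?_getD, List.getElem?_map, List.getElem?_range hu]
        simp
      rw [hmarked, pvBColMarks_contains]
      rw [List.range_eq_range']
      exact ((pvKey board (board.headD []).length u) board.length 0 t).1

-- ===== VERDICT (by name: the statement is the Claim_ definition above) =====
theorem check_column_deadlocks_spec : Claim_equal_check_column_deadlocks := by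
  intro board _ _
  exact pvPorts_eq board
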